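-- pv_equiv track=rewrite | github.com/Danpun9/Baekjoon | Python/백준/Silver/19599. 이진 삼진 탐색 놀이 1/이진 삼진 탐색 놀이 1.py | ternary_search_count
-- ===== SOURCE A (Python) =====
-- def ternary_search_count(n, target):
--     left, right = 0, n - 1
--     count = 0
--     while left <= right:
--         left_third = left + (right - left) // 3
--         right_third = right - (right - left) // 3
--
--         # 첫 번째 분할점(left_third)에서 찾았을 경우
--         if target == left_third:
--             return count
--
--         # 두 번째 분할점(right_third)에서 찾았을 경우
--         count += 1
--         if target == right_third:
--             return count
--
--         # 두 분할점에서 모두 찾지 못했을 경우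
--         count += 1
--
--         if target < left_third:
--             right = left_third - 1
--         elif target < right_third:
--             left = left_third + 1
--             right = right_third - 1
--         else:
--             left = right_third + 1
--     return count
-- ===== SOURCE B (Python) =====
-- def _tsc_probes(left, right, target):
--     # Phase 1: list of probe pairs (left_third, right_third) actually examined,
--     # ending early when the target hits a probe.
--     if left > right:
--         return []
--     lt = left + (right - left) // 3
--     rt = right - (right - left) // 3
--     if target == lt or target == rt:
--         return [(lt, rt)]
--     if target < lt:
--         return [(lt, rt)] + _tsc_probes(left, lt - 1, target)
--     if target < rt:
--         return [(lt, rt)] + _tsc_probes(lt + 1, rt - 1, target)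
--     return [(lt, rt)] + _tsc_probes(rt + 1, right, target)
--
-- def _tsc_tally(probes, target):
--     # Phase 2: every probe pair costs 2 comparisons, except that a hit on the
--     # last pair refunds 2 (first point) or 1 (second point).
--     m = 2 * len(probes)
--     if probes:
--         lt, rt = probes[-1]
--         if target == lt:
--             return m - 2
--         if target == rt:
--             return m - 1
--     return m
--
-- def ternary_search_count(n, target):
--     return _tsc_tally(_tsc_probes(0, n - 1, target), target)
-- ===== Notes on version B (the rewrite author's own statement) =====
-- stated objective: alternative
-- what changed: Replaces the single accumulator loop by a two-phase computation: first build the list of probe pairs actually examined, then derive the count arithmetically from the list length with a refund at the final hit (2*len, minus 2 or 1 if the last pair is hit).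
import Mathlib
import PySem

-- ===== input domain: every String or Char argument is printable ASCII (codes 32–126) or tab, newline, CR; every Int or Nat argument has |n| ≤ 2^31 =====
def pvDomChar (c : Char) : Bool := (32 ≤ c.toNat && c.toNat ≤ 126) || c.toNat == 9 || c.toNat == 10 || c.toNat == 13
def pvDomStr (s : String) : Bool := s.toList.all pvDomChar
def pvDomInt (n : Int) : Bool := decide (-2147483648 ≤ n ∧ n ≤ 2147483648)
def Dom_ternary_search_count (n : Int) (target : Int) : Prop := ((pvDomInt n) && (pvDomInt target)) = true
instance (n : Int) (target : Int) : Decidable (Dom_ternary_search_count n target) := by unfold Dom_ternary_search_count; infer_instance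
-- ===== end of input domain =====

-- B replaces A's counting loop by a two-phase computation: build the list of
-- probe pairs examined, then derive the count from its length (objective: alternative).

-- ===== PORT A =====
-- A's while-loop as tail recursion over the loop state (left, right, count).
-- The Nat fuel only makes the recursion structural: n + 1 fuel always outlasts
-- the loop (the range size starts at n and strictly shrinks each iteration),
-- so the fuel-exhaustion branch is never the one that produces the result.
def tscGo (target : Int) (fuel : Nat) (left right count : Int) : Int :=
  match fuel with
  | 0 => count
  | f + 1 =>
    if left ≤ right then
      let left_third := left + PySem.Int.floordiv (right - left) 3
      let right_third := right - PySem.Int.floordiv (right - left) 3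
      if target = left_third then count
      else if target = right_third then count + 1
      else if target < left_third then tscGo target f left (left_third - 1) (count + 2)
      else if target < right_third then tscGo target f (left_third + 1) (right_third - 1) (count + 2)
      else tscGo target f (right_third + 1) right (count + 2)
    else count

def ternary_search_count (n : Int) (target : Int) : Int :=
  tscGo target (n.toNat + 1) 0 (n - 1) 0

-- ===== PORT B =====
-- Phase 1 of Source B: the list of probe pairs examined (fuel as above, for
-- structural recursion only; it is never exhausted on the actual call).
def tscProbes (fuel : Nat) (left right target : Int) : List (Int × Int) :=
  match fuel with
  | 0 => []
  | f + 1 =>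
    if left > right then []
    else
      let lt := left + PySem.Int.floordiv (right - left) 3
      let rt := right - PySem.Int.floordiv (right - left) 3
      if target = lt ∨ target = rt then [(lt, rt)]
      else if target < lt then [(lt, rt)] ++ tscProbes f left (lt - 1) target
      else if target < rt then [(lt, rt)] ++ tscProbes f (lt + 1) (rt - 1) target
      else [(lt, rt)] ++ tscProbes f (rt + 1) right target

-- Phase 2 of Source B: each probe pair costs 2, a hit on the last pair refunds 2 or 1.
def tscTally (probes : List (Int × Int)) (target : Int) : Int :=
  let m : Int := 2 * probes.length
  match probes.getLast? with
  | some (lt, rt) =>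
    if target = lt then m - 2
    else if target = rt then m - 1
    else m
  | none => m

def ternary_search_count_alt (n : Int) (target : Int) : Int :=
  tscTally (tscProbes (n.toNat + 1) 0 (n - 1) target) target

-- ===== PRECONDITION & SPEC =====
def Spec_ternary_search_count (n : Int) (target : Int) (out : Int) : Prop := out = ternary_search_count_alt n target
instance (n : Int) (target : Int) (out : Int) : Decidable (Spec_ternary_search_count n target out) := by unfold Spec_ternary_search_count; infer_instance

-- ===== CLAIM (what is proved, stated in full; the proofs are below) =====
def Claim_equal_ternary_search_count : Prop := ∀ (n : Int) (target : Int), Dom_ternary_search_count n target → Spec_ternary_search_count n target (ternary_search_count n target)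

-- ===== LEMMAS AND PROOFS =====

-- Tallying a cons whose head is not a hit (or is followed by more probes)
-- adds exactly 2 to the tally of the tail.
theorem tscTally_cons (lt rt target : Int) (ps : List (Int × Int))
    (h : ps = [] → target ≠ lt ∧ target ≠ rt) :
    tscTally ((lt, rt) :: ps) target = 2 + tscTally ps target := by
  cases ps with
  | nil =>
    obtain ⟨h1, h2⟩ := h rfl
    simp [tscTally, h1, h2]
  | cons q qs =>
    simp only [tscTally, List.getLast?_cons_cons, List.length_cons]
    obtain ⟨a, b⟩ := q
    cases hg : (List.getLast? ((a, b) :: qs) : Option (Int × Int)) with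
    | none => simp at hg
    | some p =>
      obtain ⟨x, y⟩ := p
      dsimp only
      split_ifs <;> push_cast <;> ring

-- Invariant: A's loop result is the accumulator plus the tally of B's probe list.
theorem tscGo_eq_tally (target : Int) (fuel : Nat) :
    ∀ (left right count : Int),
      tscGo target fuel left right count
        = count + tscTally (tscProbes fuel left right target) target := by
  induction fuel with
  | zero => intro l r c; simp [tscGo, tscProbes, tscTally]
  | succ f ih =>
    intro l r c
    simp only [tscGo, tscProbes]
    by_cases hlr : l ≤ r
    · have hlr' : ¬ l > r := by omega
      simp only [if_pos hlr, if_neg hlr']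
      set lt := l + PySem.Int.floordiv (r - l) 3 with hlt
      set rt := r - PySem.Int.floordiv (r - l) 3 with hrt
      by_cases h1 : target = lt
      · simp [h1, tscTally]
      · by_cases h2 : target = rt
        · simp [h2, tscTally]
          split_ifs <;> omega
        · have hor : ¬ (target = lt ∨ target = rt) := by tauto
          simp only [if_neg h1, if_neg h2, if_neg hor]
          split_ifs with h3 h4 <;>
            rw [ih, List.singleton_append, tscTally_cons _ _ _ _ (fun _ => ⟨h1, h2⟩)] <;> ring
    · simp [hlr, if_pos (by omega : l > r), tscTally]

-- ===== VERDICT (by name: the statement is the Claim_ definition above) =====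
theorem ternary_search_count_spec : Claim_equal_ternary_search_count := by
  intro n target _
  unfold Spec_ternary_search_count ternary_search_count ternary_search_count_alt
  rw [tscGo_eq_tally]; ring
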